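-- pv_equiv track=rewrite | github.com/hegroiva/handleKorp | HandleKorp.py | formatNumbers
-- ===== SOURCE A (Python) =====
-- def formatNumbers(text, number):
--     """
--     Helper function to keep the code cleaner elsewhere
--     Returns the text + number -pair neatly formatted
--     """
--     maxLen = 30
--     while True:
--         if maxLen > len(text):
--             break
--         maxLen += 10
--
--     ret = ("{:<" + str(maxLen) + "}{!s}").format(text, number)
--     ret += "\n"
--     return ret
-- ===== SOURCE B (Python) =====
-- def formatNumbers(text, number):
--     """Closed-form padding width instead of the while loop."""
--     n = len(text)
--     maxLen = 30 if n < 30 else 30 + 10 * ((n - 30) // 10 + 1)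
--     return ("{:<" + str(maxLen) + "}{!s}").format(text, number) + "\n"
-- ===== Notes on version B (the rewrite author's own statement) =====
-- stated objective: simpler
-- what changed: The while loop searching for the padding width is replaced by a direct arithmetic formula (smallest 30+10k strictly greater than len(text)).
import Mathlib
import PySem

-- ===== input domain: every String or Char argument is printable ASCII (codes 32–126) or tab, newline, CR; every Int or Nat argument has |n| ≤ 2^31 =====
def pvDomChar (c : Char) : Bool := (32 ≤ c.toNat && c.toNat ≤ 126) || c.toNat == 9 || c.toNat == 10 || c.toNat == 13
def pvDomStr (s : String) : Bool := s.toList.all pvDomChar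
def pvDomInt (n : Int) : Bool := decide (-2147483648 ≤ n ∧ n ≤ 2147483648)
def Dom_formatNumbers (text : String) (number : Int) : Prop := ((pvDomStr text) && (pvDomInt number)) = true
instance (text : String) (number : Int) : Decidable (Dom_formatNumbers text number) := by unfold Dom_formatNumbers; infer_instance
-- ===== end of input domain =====

-- B computes the padding width by a closed-form formula instead of A's while loop (objective: simpler).
-- ===== PORT A =====
def formatLoop (maxLen len : Nat) : Nat :=
  if maxLen > len then maxLen else formatLoop (maxLen + 10) len
termination_by len + 1 - maxLen
decreasing_by omega

def formatNumbers (text : String) (number : Int) : String :=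
  let maxLen := formatLoop 30 text.toList.length
  let padded := text.toList ++ List.replicate (maxLen - text.toList.length) ' '
  String.ofList (padded ++ (PySem.Int.toStr number).toList ++ ['\n'])

-- ===== PORT B =====
def formatNumbers_alt (text : String) (number : Int) : String :=
  let n := text.toList.length
  let maxLen := if n < 30 then 30 else 30 + 10 * ((n - 30) / 10 + 1)
  String.ofList ((text.toList ++ List.replicate (maxLen - n) ' ') ++ (PySem.Int.toStr number).toList ++ ['\n'])

-- ===== PRECONDITION & SPEC =====
def Spec_formatNumbers (text : String) (number : Int) (out : String) : Prop := out = formatNumbers_alt text number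
instance (text : String) (number : Int) (out : String) : Decidable (Spec_formatNumbers text number out) := by unfold Spec_formatNumbers; infer_instance

-- ===== CLAIM (what is proved, stated in full; the proofs are below) =====
def Claim_equal_formatNumbers : Prop := ∀ (text : String) (number : Int), Dom_formatNumbers text number → Spec_formatNumbers text number (formatNumbers text number)

-- ===== LEMMAS AND PROOFS =====

-- ===== VERDICT (by name: the statement is the Claim_ definition above) =====
theorem formatLoop_eq (len maxLen : Nat) :
    formatLoop maxLen len = if len < maxLen then maxLen else maxLen + 10 * ((len - maxLen) / 10 + 1) := by
  unfold formatLoop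
  split_ifs with h1
  · rfl
  · rw [formatLoop_eq len (maxLen + 10)]
    split_ifs with h3 <;> omega
termination_by len + 1 - maxLen
decreasing_by omega

theorem formatNumbers_spec : Claim_equal_formatNumbers := by
  intro text number _
  unfold Spec_formatNumbers formatNumbers formatNumbers_alt
  simp only [formatLoop_eq]
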